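-- pv_equiv track=rewrite | github.com/sinsuet/msgalaxy | optimization/operator_actions.py | _select_hot_component_ids
-- ===== SOURCE A (Python) =====
-- from typing import Any, Dict, List, Optional, Sequence, Tuple
--
-- def _select_hot_component_ids(component_ids: Sequence[str]) -> List[str]:
--     preferred_keywords = ("battery", "power", "payload", "transceiver", "cpu", "amp")
--     preferred: List[str] = []
--     fallback: List[str] = []
--     for comp_id in component_ids:
--         lowered = str(comp_id).lower()
--         if any(token in lowered for token in preferred_keywords):
--             preferred.append(comp_id)
--         else:
--             fallback.append(comp_id)
--     if preferred:
--         return preferred + fallback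
--     return list(component_ids)
-- ===== SOURCE B (Python) =====
-- from typing import List, Sequence
--
-- def _select_hot_component_ids(component_ids: Sequence[str]) -> List[str]:
--     preferred_keywords = ("battery", "power", "payload", "transceiver", "cpu", "amp")
--     return sorted(
--         component_ids,
--         key=lambda c: not any(token in str(c).lower() for token in preferred_keywords),
--     )
-- ===== Notes on version B (the rewrite author's own statement) =====
-- stated objective: idiomatic
-- what changed: Replaced the two-accumulator partition loop plus the redundant 'if preferred' fallback branch with a single stable sort on a boolean no-match key, which moves keyword-matching ids to the front while preserving relative order.
import Mathlib
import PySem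

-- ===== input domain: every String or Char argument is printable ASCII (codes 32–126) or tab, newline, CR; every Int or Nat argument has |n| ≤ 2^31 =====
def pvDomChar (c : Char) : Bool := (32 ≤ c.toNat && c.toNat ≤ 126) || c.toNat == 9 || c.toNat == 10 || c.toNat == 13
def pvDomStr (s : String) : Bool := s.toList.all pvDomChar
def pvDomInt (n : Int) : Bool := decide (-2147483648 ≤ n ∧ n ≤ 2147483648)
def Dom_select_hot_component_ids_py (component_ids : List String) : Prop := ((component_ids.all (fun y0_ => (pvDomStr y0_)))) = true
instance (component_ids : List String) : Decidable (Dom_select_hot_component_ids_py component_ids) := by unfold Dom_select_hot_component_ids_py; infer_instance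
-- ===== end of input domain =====

-- B replaces A's two-accumulator partition loop (and its redundant fallback branch)
-- with a single stable sort on a boolean "no keyword match" key (objective: idiomatic).

-- ===== PORT A =====
def select_hot_component_ids_py (component_ids : List String) : List String :=
  let preferred_keywords : List String := ["battery", "power", "payload", "transceiver", "cpu", "amp"]
  let st := component_ids.foldl (fun (acc : List String × List String) comp_id =>
      let lowered := PySem.Str.lower comp_id
      if preferred_keywords.any (fun token => PySem.Str.isIn token lowered) then
        (acc.1 ++ [comp_id], acc.2)
      else
        (acc.1, acc.2 ++ [comp_id])) ([], [])
  if st.1 ≠ [] then st.1 ++ st.2 else component_ids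

-- ===== PORT B =====
-- key=lambda c: not any(token in str(c).lower() for token in preferred_keywords)
def pvKeyB (c : String) : Bool :=
  !(["battery", "power", "payload", "transceiver", "cpu", "amp"].any
      (fun token => PySem.Str.isIn token (PySem.Str.lower c)))

def select_hot_component_ids_py_alt (component_ids : List String) : List String :=
  PySem.List.sorted component_ids pvKeyB

-- ===== PRECONDITION & SPEC =====
def Spec_select_hot_component_ids_py (component_ids : List String) (out : List String) : Prop := out = select_hot_component_ids_py_alt component_ids
instance (component_ids : List String) (out : List String) : Decidable (Spec_select_hot_component_ids_py component_ids out) := by unfold Spec_select_hot_component_ids_py; infer_instance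

-- ===== CLAIM (what is proved, stated in full; the proofs are below) =====
def Claim_equal_select_hot_component_ids_py : Prop := ∀ (component_ids : List String), Dom_select_hot_component_ids_py component_ids → Spec_select_hot_component_ids_py component_ids (select_hot_component_ids_py component_ids)

-- ===== LEMMAS AND PROOFS =====

-- the shared match predicate (pvKeyB c = !pvHot c)
def pvHot (c : String) : Bool :=
  ["battery", "power", "payload", "transceiver", "cpu", "amp"].any
    (fun token => PySem.Str.isIn token (PySem.Str.lower c))

theorem pvKeyB_eq (c : String) : pvKeyB c = !pvHot c := rfl

-- A's fold step, named
def pvStepA (acc : List String × List String) (comp_id : String) : List String × List String :=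
  if pvHot comp_id then (acc.1 ++ [comp_id], acc.2) else (acc.1, acc.2 ++ [comp_id])

theorem pvA_def (ids : List String) :
    select_hot_component_ids_py ids =
      (if (ids.foldl pvStepA ([], [])).1 ≠ [] then
        (ids.foldl pvStepA ([], [])).1 ++ (ids.foldl pvStepA ([], [])).2
      else ids) := rfl

-- A's fold accumulates the two filters
theorem pvA_fold (xs : List String) (P F : List String) :
    xs.foldl pvStepA (P, F)
      = (P ++ xs.filter pvHot, F ++ xs.filter (fun c => !pvHot c)) := by
  induction xs generalizing P F with
  | nil => simp
  | cons x xs ih =>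
    cases hx : pvHot x with
    | true =>
      simp only [List.foldl_cons, pvStepA, hx, if_true, ih, List.filter_cons, Bool.not_true,
        Bool.false_eq_true, if_false]
      simp
    | false =>
      simp only [List.foldl_cons, pvStepA, hx, Bool.false_eq_true, if_false, ih,
        List.filter_cons, Bool.not_false, if_true]
      simp

theorem pvA_eq (ids : List String) :
    select_hot_component_ids_py ids = ids.filter pvHot ++ ids.filter (fun c => !pvHot c) := by
  rw [pvA_def, pvA_fold ids [] []]
  simp only [List.nil_append]
  by_cases h : ids.filter pvHot = []
  · have hall : ∀ c ∈ ids, pvHot c = false := by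
      intro c hc
      by_contra hcf
      have : c ∈ ids.filter pvHot := List.mem_filter.mpr ⟨hc, by simpa using hcf⟩
      simp [h] at this
    have h2 : ids.filter (fun c => !pvHot c) = ids :=
      List.filter_eq_self.mpr (fun c hc => by simp [hall c hc])
    simp [h, h2]
  · simp [h]

-- inserting a non-preferred element (key true) goes to the very end
theorem pvInsert_true (x : String) (ys : List String) (hx : pvKeyB x = true) :
    PySem.List.insertBy (fun a b => decide (pvKeyB a < pvKeyB b)) x ys = ys ++ [x] := by
  apply PySem.List.insertBy_of_forall_not_before
  intro y _
  rw [hx]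
  cases pvKeyB y <;> decide

-- inserting a preferred element (key false) skips the preferred prefix and lands before the rest
theorem pvInsert_false (x : String) (P F : List String) (hx : pvKeyB x = false)
    (hP : ∀ p ∈ P, pvKeyB p = false) (hF : ∀ f ∈ F, pvKeyB f = true) :
    PySem.List.insertBy (fun a b => decide (pvKeyB a < pvKeyB b)) x (P ++ F) = P ++ x :: F := by
  induction P with
  | nil =>
    cases F with
    | nil => simp [PySem.List.insertBy]
    | cons f fs =>
      have hf : pvKeyB f = true := hF f (by simp)
      simp only [List.nil_append, PySem.List.insertBy, hx, hf]
      rw [if_pos (by decide)]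
  | cons p ps ih =>
    have hp : pvKeyB p = false := hP p (by simp)
    simp only [List.cons_append, PySem.List.insertBy]
    rw [if_neg (by rw [hx, hp]; decide)]
    rw [ih (fun q hq => hP q (List.mem_cons_of_mem p hq))]

-- the insertion-sort fold maintains "preferred prefix ++ fallback suffix"
theorem pvB_fold (xs : List String) (P F : List String)
    (hP : ∀ p ∈ P, pvKeyB p = false) (hF : ∀ f ∈ F, pvKeyB f = true) :
    xs.foldl (fun acc x => PySem.List.insertBy (fun a b => decide (pvKeyB a < pvKeyB b)) x acc) (P ++ F)
    = (P ++ xs.filter pvHot) ++ (F ++ xs.filter (fun c => !pvHot c)) := by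
  induction xs generalizing P F with
  | nil => simp
  | cons x xs ih =>
    cases hx : pvHot x with
    | true =>
      have hk : pvKeyB x = false := by rw [pvKeyB_eq, hx]; rfl
      rw [List.foldl_cons, pvInsert_false x P F hk hP hF]
      have hsplit : P ++ x :: F = (P ++ [x]) ++ F := by simp
      rw [hsplit, ih (P ++ [x]) F
        (by intro q hq
            rcases List.mem_append.mp hq with h | h
            · exact hP q h
            · simp only [List.mem_singleton] at h; rw [h]; exact hk)
        hF]
      simp only [List.filter_cons, hx, if_true, Bool.not_true, Bool.false_eq_true, if_false]
      simp
    | false =>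
      have hk : pvKeyB x = true := by rw [pvKeyB_eq, hx]; rfl
      rw [List.foldl_cons, pvInsert_true x (P ++ F) hk]
      have hsplit : (P ++ F) ++ [x] = P ++ (F ++ [x]) := by simp
      rw [hsplit, ih P (F ++ [x]) hP
        (by intro q hq
            rcases List.mem_append.mp hq with h | h
            · exact hF q h
            · simp only [List.mem_singleton] at h; rw [h]; exact hk)]
      simp only [List.filter_cons, hx, Bool.false_eq_true, if_false, Bool.not_false, if_true]
      simp

theorem pvB_eq (ids : List String) :
    select_hot_component_ids_py_alt ids = ids.filter pvHot ++ ids.filter (fun c => !pvHot c) := by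
  unfold select_hot_component_ids_py_alt
  rw [PySem.List.sorted_eq_foldl_insertBy]
  have h := pvB_fold ids [] [] (by simp) (by simp)
  simpa using h

-- ===== VERDICT (by name: the statement is the Claim_ definition above) =====
theorem select_hot_component_ids_py_spec : Claim_equal_select_hot_component_ids_py := by
  intro ids _
  unfold Spec_select_hot_component_ids_py
  rw [pvA_eq, pvB_eq]
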